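-- pv_equiv track=rewrite | github.com/alz2/cs410-final-project | website/app.py | get_peripheral
-- ===== SOURCE A (Python) =====
-- def get_peripheral(corpus_words, target_words, n):
--     corpus_words_lower = [t.lower() for t in corpus_words]
--     attempt = 0 # index to begin search
--     found = False
--     target_occur = -1
--     while not found:
--         try: # search lower case
--             target_occur = corpus_words_lower.index(target_words[0], attempt)
--         except ValueError:
--             return (-1, -1)
--         # occurance of first string in target
--         toff = 1
--         found_seq = True
--         for ti in range(1, len(target_words)): # search next words to see if they match query
--             if target_occur + ti >= len(corpus_words_lower): # no more words in corpus
--                 return (-1 , -1)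
--
--             if target_words[toff] != corpus_words_lower[target_occur + ti]:
--                 found_seq = False
--                 break
--             toff += 1
--
--         if found_seq:
--             found = True
--         else:
--             attempt = target_occur + 1 # try again at different location
--
--     # sequence found! Try to get indices for n words left and right
--     return (max(0, target_occur - n), min(target_occur + len(target_words) + n, len(corpus_words)))
-- ===== SOURCE B (Python) =====
-- def get_peripheral(corpus_words, target_words, n):
--     # Staged sieve: keep all candidate start positions, filter them
--     # once per target word (position-set narrowing instead of per-position verify).
--     words = [w.lower() for w in corpus_words]
--     m = len(target_words)
--     cand = list(range(len(words) - m + 1))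
--     for k, t in enumerate(target_words):
--         cand = [i for i in cand if words[i + k] == t]
--     if cand:
--         i = cand[0]
--         return (max(0, i - n), min(i + m + n, len(words)))
--     return (-1, -1)
-- ===== Notes on version B (the rewrite author's own statement) =====
-- stated objective: alternative
-- what changed: A jumps between occurrences of the first target word via list.index and verifies the remaining words position by position; B inverts the traversal: it keeps the list of all candidate start positions and narrows it with one filtering pass per target word, then takes the first surviving position.
-- crash fix: On empty target_words A raises IndexError (target_words[0]); B returns the window around position 0, (max(0,-n), min(n, len(corpus_words))). — e.g. on get_peripheral([], [], 0): A raises IndexError, B returns (0, 0)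
import Mathlib
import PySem

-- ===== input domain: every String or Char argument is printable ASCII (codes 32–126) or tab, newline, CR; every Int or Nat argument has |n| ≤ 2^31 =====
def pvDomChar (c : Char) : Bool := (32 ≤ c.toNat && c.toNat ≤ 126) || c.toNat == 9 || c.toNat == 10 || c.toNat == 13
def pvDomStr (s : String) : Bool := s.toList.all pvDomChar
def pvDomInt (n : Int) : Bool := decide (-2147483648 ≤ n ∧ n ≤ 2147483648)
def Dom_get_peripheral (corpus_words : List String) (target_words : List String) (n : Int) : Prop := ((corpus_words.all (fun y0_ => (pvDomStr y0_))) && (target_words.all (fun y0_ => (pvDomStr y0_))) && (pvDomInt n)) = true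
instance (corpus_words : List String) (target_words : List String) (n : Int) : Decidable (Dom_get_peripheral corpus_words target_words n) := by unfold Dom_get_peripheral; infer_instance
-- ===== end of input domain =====

-- B replaces A's index()-jump-and-verify search by a staged sieve: it keeps the list of all
-- candidate start positions and narrows it with one filtering pass per target word (objective: alternative).

-- ===== PORT A =====
-- inner 'for ti in range(1, len(target_words))' loop; result: none = the 'return (-1,-1)' overrun exit,
-- some true = found_seq stayed True, some false = found_seq set False by the break.
def pvInnerA (cl : List String) (tws : List String) (j : Int) : List Int → Option Bool
  | [] => some true
  | ti :: rest =>
    if (cl.length : Int) ≤ j + ti then none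
    else if PySem.List.pyGetD tws ti "" ≠ PySem.List.pyGetD cl (j + ti) "" then some false
    else pvInnerA cl tws j rest

-- the 'while not found' loop; corpus_words_lower.index(target_words[0], attempt) is ported as
-- index? over the suffix from attempt (first match at or after attempt); none = the ValueError exit.
def pvLoopA (cl : List String) (tws : List String) (t0 : String) (attempt : Nat) : Option Nat :=
  match h : PySem.List.index? (cl.drop attempt) t0 with
  | none => none
  | some k =>
    let j := attempt + k
    match pvInnerA cl tws (j : Int) (PySem.List.pyRange 1 (tws.length : Int) 1) with
    | none => none
    | some true => some j
    | some false => pvLoopA cl tws t0 (j + 1)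
termination_by cl.length - attempt
decreasing_by
  obtain ⟨hk, -, -⟩ := PySem.List.getElem_of_index?_eq_some h
  simp [List.length_drop] at hk
  omega

def get_peripheral (corpus_words : List String) (target_words : List String) (n : Int) : Int × Int :=
  let cl := corpus_words.map PySem.Str.lower
  -- target_words[0]: under Pre_ target_words ≠ [], so the default never fires
  let t0 := PySem.List.pyGetD target_words 0 ""
  match pvLoopA cl target_words t0 0 with
  | none => (-1, -1)
  | some j => (max 0 ((j : Int) - n), min ((j : Int) + target_words.length + n) (corpus_words.length : Int))

-- ===== PORT B =====
-- B's 'for k, t in enumerate(target_words): cand = [i for i in cand if words[i+k] == t]' loop.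
-- words[i+k] is always in range for the candidates kept (0 ≤ i ≤ N-m, k < m), so pyGetD is exact here.
def pvSieveB (words : List String) : List Int → List (Int × String) → List Int
  | cand, [] => cand
  | cand, (k, t) :: rest =>
      pvSieveB words (cand.filter (fun i => PySem.List.pyGetD words (i + k) "" == t)) rest

def get_peripheral_alt (corpus_words : List String) (target_words : List String) (n : Int) : Int × Int :=
  let words := corpus_words.map PySem.Str.lower
  let m := target_words.length
  let cand0 := PySem.List.pyRange 0 ((words.length : Int) - m + 1) 1
  match pvSieveB words cand0 (PySem.List.enumerate target_words) with
  | i :: _ => (max 0 (i - n), min (i + m + n) ((words.length : Int)))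
  | [] => (-1, -1)

-- ===== PRECONDITION & SPEC =====
-- Pre_ excludes only empty target_words, on which the Python A raises IndexError at target_words[0].
def Pre_get_peripheral (corpus_words : List String) (target_words : List String) (n : Int) : Prop := target_words ≠ []
instance (corpus_words : List String) (target_words : List String) (n : Int) : Decidable (Pre_get_peripheral corpus_words target_words n) := by unfold Pre_get_peripheral; infer_instance

def pvWitness_get_peripheral : List String × List String × Int := (["a", "b"], ["b"], 1)

-- On empty target_words A raises IndexError (target_words[0]); B returns the window around position 0.
def Raises_get_peripheral (corpus_words : List String) (target_words : List String) (n : Int) : Prop := target_words = []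
instance (corpus_words : List String) (target_words : List String) (n : Int) : Decidable (Raises_get_peripheral corpus_words target_words n) := by unfold Raises_get_peripheral; infer_instance
def pvRaiseWitness_get_peripheral : List String × List String × Int := ([], [], 0)
def pvRaiseWitnessOut_get_peripheral : Int × Int := (0, 0)

def Spec_get_peripheral (corpus_words : List String) (target_words : List String) (n : Int) (out : Int × Int) : Prop := out = get_peripheral_alt corpus_words target_words n
instance (corpus_words : List String) (target_words : List String) (n : Int) (out : Int × Int) : Decidable (Spec_get_peripheral corpus_words target_words n out) := by unfold Spec_get_peripheral; infer_instance

-- ===== CLAIM (what is proved, stated in full; the proofs are below) =====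
def Claim_equal_get_peripheral : Prop := ∀ (corpus_words : List String) (target_words : List String) (n : Int), Dom_get_peripheral corpus_words target_words n → Pre_get_peripheral corpus_words target_words n → Spec_get_peripheral corpus_words target_words n (get_peripheral corpus_words target_words n)

def Claim_raises_get_peripheral : Prop := (∀ (corpus_words : List String) (target_words : List String) (n : Int), Dom_get_peripheral corpus_words target_words n → Raises_get_peripheral corpus_words target_words n → ¬ Pre_get_peripheral corpus_words target_words n) ∧ (Dom_get_peripheral (pvRaiseWitness_get_peripheral.1) (pvRaiseWitness_get_peripheral.2.1) (pvRaiseWitness_get_peripheral.2.2) ∧ Raises_get_peripheral (pvRaiseWitness_get_peripheral.1) (pvRaiseWitness_get_peripheral.2.1) (pvRaiseWitness_get_peripheral.2.2) ∧ get_peripheral_alt (pvRaiseWitness_get_peripheral.1) (pvRaiseWitness_get_peripheral.2.1) (pvRaiseWitness_get_peripheral.2.2) = pvRaiseWitnessOut_get_peripheral)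

-- ===== LEMMAS AND PROOFS =====

-- B's staged sieve is the single filter by the conjunction of all stage predicates.
theorem pvSieveB_eq_filter (words : List String) (cand : List Int) (ps : List (Int × String)) :
    pvSieveB words cand ps
      = cand.filter (fun i => ps.all (fun p => PySem.List.pyGetD words (i + p.1) "" == p.2)) := by
  induction ps generalizing cand with
  | nil => simp [pvSieveB]
  | cons p rest ih =>
    obtain ⟨k, t⟩ := p
    rw [pvSieveB, ih, List.filter_filter]
    congr 1
    funext i
    simp [Bool.and_comm]

theorem head?_filter_eq_find? (p : Int → Bool) (l : List Int) :
    (l.filter p).head? = l.find? p := by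
  induction l with
  | nil => rfl
  | cons x rest ih => by_cases h : p x <;> simp [List.filter, List.find?, h, ih]

theorem find?_congr_mem (p q : Int → Bool) (l : List Int) (h : ∀ x ∈ l, p x = q x) :
    l.find? p = l.find? q := by
  induction l with
  | nil => rfl
  | cons x rest ih =>
    have hx := h x (by simp)
    by_cases hp : p x
    · simp [List.find?, hp, hx ▸ hp]
    · have hq : q x = false := by rw [← hx]; simpa using hp
      simp [List.find?, hp, hq]
      exact ih (fun y hy => h y (by simp [hy]))

theorem td_iff (cl tws : List String) (u : Nat) (hm : tws ≠ []) :
    ((cl.drop u).take tws.length = tws) ↔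
      (u + tws.length ≤ cl.length ∧ ∀ ti < tws.length, cl.getD (u + ti) "" = tws.getD ti "") := by
  have hm1 : 1 ≤ tws.length := List.length_pos_iff.mpr hm
  constructor
  · intro h
    have hlen : ((cl.drop u).take tws.length).length = tws.length := by rw [h]
    have hlen' : min tws.length (cl.length - u) = tws.length := by
      simpa [List.length_take, List.length_drop] using hlen
    have hle : u + tws.length ≤ cl.length := by omega
    refine ⟨hle, fun ti hti => ?_⟩
    rw [← h]
    rw [List.getD_eq_getElem _ _ (by omega),
        List.getD_eq_getElem _ _ (by rw [h]; exact hti)]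
    simp [List.getElem_take, List.getElem_drop]
  · rintro ⟨hle, helt⟩
    apply List.ext_getElem
    · simp [List.length_take, List.length_drop]; omega
    · intro i h1 h2
      have := helt i h2
      rw [List.getD_eq_getElem _ _ (by omega), List.getD_eq_getElem _ _ h2] at this
      simpa [List.getElem_take, List.getElem_drop] using this

theorem slice_iff (cl tws : List String) (i : Int) (hi : 0 ≤ i) (hm : tws ≠ []) :
    (PySem.List.slice cl (some i) (some (i + (tws.length : Int))) = tws) ↔
      (i.toNat + tws.length ≤ cl.length ∧
        ∀ ti < tws.length, cl.getD (i.toNat + ti) "" = tws.getD ti "") := by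
  lift i to Nat using hi
  rw [PySem.List.slice_natCast_add, Int.toNat_natCast]
  exact td_iff cl tws _ hm

-- B's stage-conjunction predicate agrees with the window (slice) predicate on the candidate range.
theorem sievePred_eq_slicePred (cl tws : List String) (hm : tws ≠ []) (i : Int)
    (h0 : 0 ≤ i) (hub : i < (cl.length : Int) - tws.length + 1) :
    ((PySem.List.enumerate tws).all (fun p => PySem.List.pyGetD cl (i + p.1) "" == p.2))
      = decide (PySem.List.slice cl (some i) (some (i + (tws.length : Int))) = tws) := by
  rcases Bool.eq_false_or_eq_true
      ((PySem.List.enumerate tws).all (fun p => PySem.List.pyGetD cl (i + p.1) "" == p.2)) with hA | hA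
  · rw [hA]
    symm; apply decide_eq_true
    rw [List.all_eq_true] at hA
    apply (slice_iff cl tws i h0 hm).mpr
    refine ⟨by omega, fun ti hti => ?_⟩
    have hp : ((0 : Int) + ti, tws[ti]) ∈ PySem.List.enumerate tws := by
      rw [PySem.List.mem_enumerate_iff]; exact ⟨ti, hti, rfl⟩
    have := hA _ hp
    simp only [beq_iff_eq] at this
    rw [show i + ((0 : Int) + (ti : Int)) = ((i.toNat + ti : Nat) : Int) by omega,
        PySem.List.pyGetD_natCast] at this
    rw [this]
    exact (List.getD_eq_getElem tws "" hti).symm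
  · rw [hA]
    symm; apply decide_eq_false
    intro hsl
    obtain ⟨hle, hall⟩ := (slice_iff cl tws i h0 hm).mp hsl
    rw [List.all_eq_false] at hA
    obtain ⟨p, hp, hne⟩ := hA
    rw [PySem.List.mem_enumerate_iff] at hp
    obtain ⟨k, hk, rfl⟩ := hp
    apply hne
    simp only [Nat.cast_zero, zero_add, beq_iff_eq]
    have := hall k hk
    rw [show i + (k : Int) = ((i.toNat + k : Nat) : Int) by omega, PySem.List.pyGetD_natCast, this]
    exact List.getD_eq_getElem tws "" hk

theorem inner_true_iff (cl tws : List String) (j : Int) (l : List Int) :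
    pvInnerA cl tws j l = some true ↔
      ∀ ti ∈ l, j + ti < (cl.length : Int) ∧
        PySem.List.pyGetD tws ti "" = PySem.List.pyGetD cl (j + ti) "" := by
  induction l with
  | nil => simp [pvInnerA]
  | cons ti rest ih =>
    simp only [pvInnerA, List.mem_cons]
    split_ifs with h1 h2
    · exact iff_of_false (by simp) (fun hall => by have := (hall ti (Or.inl rfl)).1; omega)
    · exact iff_of_false (by simp) (fun hall => h2 (hall ti (Or.inl rfl)).2)
    · simp at h2; rw [ih]
      constructor
      · intro hall; exact fun x hx => hx.elim (fun he => he ▸ ⟨by omega, h2⟩) (hall x)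
      · intro hall x hx; exact hall x (Or.inr hx)

theorem inner_none_overrun (cl tws : List String) (j : Int) (l : List Int) :
    pvInnerA cl tws j l = none → ∃ ti ∈ l, (cl.length : Int) ≤ j + ti := by
  induction l with
  | nil => simp [pvInnerA]
  | cons ti rest ih =>
    simp only [pvInnerA]
    split_ifs with h1 h2
    · exact fun _ => ⟨ti, by simp, h1⟩
    · simp
    · intro h; obtain ⟨x, hx, hh⟩ := ih h; exact ⟨x, by simp [hx], hh⟩

theorem inner_false_mismatch (cl tws : List String) (j : Int) (l : List Int) :
    pvInnerA cl tws j l = some false →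
      ∃ ti ∈ l, j + ti < (cl.length : Int) ∧
        PySem.List.pyGetD tws ti "" ≠ PySem.List.pyGetD cl (j + ti) "" := by
  induction l with
  | nil => simp [pvInnerA]
  | cons ti rest ih =>
    simp only [pvInnerA]
    split_ifs with h1 h2
    · simp
    · exact fun _ => ⟨ti, by simp, by omega, h2⟩
    · intro h; obtain ⟨x, hx, hh⟩ := ih h; exact ⟨x, by simp [hx], hh⟩

theorem find?_pyRange_skip (p : Int → Bool) (a c K : Int) (hac : a ≤ c)
    (hfail : ∀ i, a ≤ i → i < c → p i = false) :
    (PySem.List.pyRange a K 1).find? p = (PySem.List.pyRange c K 1).find? p := by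
  rcases (by omega : c ≤ K ∨ K < c) with h | h
  · rw [PySem.List.pyRange_one_append a c K hac h, List.find?_append]
    have hnone : (PySem.List.pyRange a c 1).find? p = none :=
      List.find?_eq_none.mpr (fun x hx => by
        rw [PySem.List.mem_pyRange_one] at hx
        simp [hfail x hx.1 hx.2])
    simp [hnone]
  · rw [PySem.List.pyRange_one_eq_nil (le_of_lt h)]
    simp only [List.find?_nil]
    exact List.find?_eq_none.mpr (fun x hx => by
      rw [PySem.List.mem_pyRange_one] at hx
      simp [hfail x hx.1 (lt_trans hx.2 h)])

theorem index_facts (cl : List String) (t0 : String) (a k : Nat)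
    (h : PySem.List.index? (cl.drop a) t0 = some k) :
    a + k < cl.length ∧ cl.getD (a + k) "" = t0 ∧
      ∀ u, a ≤ u → u < a + k → cl.getD u "" ≠ t0 := by
  obtain ⟨hk, heq, hlt⟩ := PySem.List.getElem_of_index?_eq_some h
  have hkN : a + k < cl.length := by simp [List.length_drop] at hk; omega
  refine ⟨hkN, ?_, ?_⟩
  · rw [List.getD_eq_getElem _ _ hkN, ← heq]
    simp [List.getElem_drop]
  · intro u hu1 hu2 hc
    have hlen : u - a < (List.drop a cl).length := by simp [List.length_drop]; omega
    apply hlt (u - a) (by omega)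
    rw [List.getD_eq_getElem _ _ (by omega : u < cl.length)] at hc
    rw [← hc]
    simp only [List.getElem_drop]
    congr 1
    omega

theorem getD_mem_drop (cl : List String) (a u : Nat) (hu : a ≤ u) (huN : u < cl.length) :
    cl.getD u "" ∈ cl.drop a := by
  rw [List.getD_eq_getElem _ _ huN]
  have hlen : u - a < (cl.drop a).length := by simp [List.length_drop]; omega
  have he : (cl.drop a)[u - a] = cl[u] := by
    simp only [List.getElem_drop]; congr 1; omega
  rw [← he]
  exact List.getElem_mem _

theorem pb_true_head (cl tws : List String) (htws : tws ≠ []) (i : Int) (h0 : 0 ≤ i)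
    (hsl : PySem.List.slice cl (some i) (some (i + (tws.length : Int))) = tws) :
    i.toNat < cl.length ∧ cl.getD i.toNat "" = tws.getD 0 "" := by
  have hm1 : 1 ≤ tws.length := List.length_pos_iff.mpr htws
  obtain ⟨hle, hall⟩ := (slice_iff cl tws i h0 htws).mp hsl
  exact ⟨by omega, by simpa using hall 0 hm1⟩

-- slice predicate false at any position strictly before the index() hit
theorem pb_false_before (cl tws : List String) (htws : tws ≠ []) (a j : Nat)
    (hbef : ∀ u, a ≤ u → u < j → cl.getD u "" ≠ tws.getD 0 "")
    (i : Int) (h1 : (a : Int) ≤ i) (h2 : i < (j : Int)) :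
    (decide (PySem.List.slice cl (some i) (some (i + (tws.length : Int))) = tws)) = false := by
  have h0 : 0 ≤ i := by omega
  apply decide_eq_false
  intro hsl
  obtain ⟨hiN, hhead⟩ := pb_true_head cl tws htws i h0 hsl
  exact hbef i.toNat (by omega) (by omega) hhead

-- A's loop from attempt a computes the first window match at or after a (as find? over the range).
theorem main_lemma (cl tws : List String) (htws : tws ≠ []) (a : Nat) :
    (PySem.List.pyRange (a : Int) ((cl.length : Int) - tws.length + 1) 1).find?
        (fun i => decide (PySem.List.slice cl (some i) (some (i + (tws.length : Int))) = tws))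
      = (pvLoopA cl tws (PySem.List.pyGetD tws 0 "") a).map (fun j => (j : Int)) := by
  have hm1 : 1 ≤ tws.length := List.length_pos_iff.mpr htws
  rw [PySem.List.pyGetD_zero] at *
  fun_induction pvLoopA cl tws (tws.getD 0 "") a with
  | case1 a h =>
    rw [PySem.List.index?_eq_none_iff] at h
    have hnone : (PySem.List.pyRange (a : Int) ((cl.length : Int) - tws.length + 1) 1).find?
        (fun i => decide (PySem.List.slice cl (some i) (some (i + (tws.length : Int))) = tws)) = none := by
      apply List.find?_eq_none.mpr
      intro x hx
      rw [PySem.List.mem_pyRange_one] at hx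
      simp only [Bool.not_eq_true]
      apply decide_eq_false
      intro hsl
      obtain ⟨hxN, hhead⟩ := pb_true_head cl tws htws x (by omega) hsl
      exact h (hhead ▸ getD_mem_drop cl a x.toNat (by omega) hxN)
    rw [hnone]
    rfl
  | case2 a k h j hinner =>
    obtain ⟨hjN, hj0, hbef⟩ := index_facts cl _ a k h
    obtain ⟨ti, hti, hov⟩ := inner_none_overrun cl tws _ _ hinner
    rw [PySem.List.mem_pyRange_one] at hti
    have hjbig : (cl.length : Int) - tws.length + 1 ≤ (j : Int) := by omega
    have hnone : (PySem.List.pyRange (a : Int) ((cl.length : Int) - tws.length + 1) 1).find?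
        (fun i => decide (PySem.List.slice cl (some i) (some (i + (tws.length : Int))) = tws)) = none := by
      apply List.find?_eq_none.mpr
      intro x hx
      rw [PySem.List.mem_pyRange_one] at hx
      simp only [Bool.not_eq_true]
      exact pb_false_before cl tws htws a j hbef x hx.1 (by omega)
    rw [hnone]
    rfl
  | case3 a k h j hinner =>
    obtain ⟨hjN, hj0, hbef⟩ := index_facts cl _ a k h
    have hall := (inner_true_iff cl tws _ _).mp hinner
    have hjm : j + tws.length ≤ cl.length := by
      rcases Nat.lt_or_ge 1 tws.length with hm2 | hm2
      · have hmem : ((tws.length - 1 : Nat) : Int) ∈ PySem.List.pyRange 1 (tws.length : Int) 1 :=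
          PySem.List.mem_pyRange_one.mpr ⟨by omega, by omega⟩
        have := (hall _ hmem).1
        omega
      · omega
    have hPj : PySem.List.slice cl (some (j : Int)) (some ((j : Int) + (tws.length : Int))) = tws := by
      apply (slice_iff cl tws (j : Int) (by omega) htws).mpr
      rw [Int.toNat_natCast]
      refine ⟨hjm, fun ti hti => ?_⟩
      rcases Nat.eq_zero_or_pos ti with rfl | htipos
      · simpa using hj0
      · have hmem : ((ti : Nat) : Int) ∈ PySem.List.pyRange 1 (tws.length : Int) 1 :=
          PySem.List.mem_pyRange_one.mpr ⟨by omega, by omega⟩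
        have heq := (hall _ hmem).2
        rw [PySem.List.pyGetD_natCast] at heq
        rw [show ((j : Int) + (ti : Int)) = ((j + ti : Nat) : Int) by push_cast; ring] at heq
        rw [PySem.List.pyGetD_natCast] at heq
        exact heq.symm
    have hjK : (j : Int) < (cl.length : Int) - tws.length + 1 := by omega
    rw [find?_pyRange_skip _ (a : Int) (j : Int) _ (by omega)
        (fun i h1 h2 => pb_false_before cl tws htws a j hbef i h1 h2)]
    rw [PySem.List.pyRange_one_cons hjK]
    simp [hPj]
  | case4 a k h j hinner ih =>
    obtain ⟨hjN, hj0, hbef⟩ := index_facts cl _ a k h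
    obtain ⟨ti, hti, htiN, hne⟩ := inner_false_mismatch cl tws _ _ hinner
    rw [PySem.List.mem_pyRange_one] at hti
    have hPj : (decide (PySem.List.slice cl (some (j : Int)) (some ((j : Int) + (tws.length : Int))) = tws)) = false := by
      apply decide_eq_false
      intro hsl
      obtain ⟨hle, hallm⟩ := (slice_iff cl tws (j : Int) (by omega) htws).mp hsl
      rw [Int.toNat_natCast] at hle hallm
      apply hne
      have heq := hallm ti.toNat (by omega)
      rw [show ((ti : Int)) = ((ti.toNat : Nat) : Int) by omega, PySem.List.pyGetD_natCast]
      rw [show ((j : Int) + ((ti.toNat : Nat) : Int)) = ((j + ti.toNat : Nat) : Int) by push_cast; ring,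
          PySem.List.pyGetD_natCast]
      exact heq.symm
    rw [find?_pyRange_skip _ (a : Int) ((j : Int) + 1) _ (by omega) (fun i h1 h2 => by
      rcases (by omega : i < (j : Int) ∨ i = (j : Int)) with hlt | rfl
      · exact pb_false_before cl tws htws a j hbef i h1 hlt
      · exact hPj)]
    rw [show ((j : Int) + 1) = ((j + 1 : Nat) : Int) by push_cast; ring]
    exact ih

-- B's sieve over the full range computes the same find?.
theorem alt_head_eq_find? (cl tws : List String) (htws : tws ≠ []) :
    (pvSieveB cl (PySem.List.pyRange 0 ((cl.length : Int) - tws.length + 1) 1)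
        (PySem.List.enumerate tws)).head?
      = (PySem.List.pyRange 0 ((cl.length : Int) - tws.length + 1) 1).find?
          (fun i => decide (PySem.List.slice cl (some i) (some (i + (tws.length : Int))) = tws)) := by
  rw [pvSieveB_eq_filter, head?_filter_eq_find?]
  apply find?_congr_mem
  intro x hx
  rw [PySem.List.mem_pyRange_one] at hx
  exact sievePred_eq_slicePred cl tws htws x hx.1 hx.2

theorem get_peripheral_spec : Claim_equal_get_peripheral := by
  intro cw tws n _ hpre
  unfold Spec_get_peripheral get_peripheral get_peripheral_alt
  simp only [List.length_map]
  have hb := alt_head_eq_find? (cw.map PySem.Str.lower) tws hpre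
  have hm := main_lemma (cw.map PySem.Str.lower) tws hpre 0
  simp only [Nat.cast_zero, List.length_map] at hb hm
  rw [hm] at hb
  cases h : pvLoopA (cw.map PySem.Str.lower) tws (PySem.List.pyGetD tws 0 "") 0 with
  | none =>
    rw [h] at hb
    cases hc : pvSieveB (cw.map PySem.Str.lower)
        (PySem.List.pyRange 0 ((cw.length : Int) - tws.length + 1) 1) (PySem.List.enumerate tws) with
    | nil => rfl
    | cons i rest => rw [hc] at hb; simp at hb
  | some j =>
    rw [h] at hb
    cases hc : pvSieveB (cw.map PySem.Str.lower)
        (PySem.List.pyRange 0 ((cw.length : Int) - tws.length + 1) 1) (PySem.List.enumerate tws) with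
    | nil => rw [hc] at hb; simp at hb
    | cons i rest =>
      simp at hb ⊢
      rw [hc] at hb
      simp at hb
      omega

@[simp] theorem get_peripheral_raises : Claim_raises_get_peripheral := by
  unfold Claim_raises_get_peripheral
  exact ⟨fun _ _ _ _ h hp => hp h, by decide⟩
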